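-- pv_equiv track=rewrite | github.com/sgouda835/LeetcodeSolutions | Getelemwhichhassingleoccurence.py | getelemwhichhassingleoccurence
-- ===== SOURCE A (Python) =====
-- def getelemwhichhassingleoccurence(myarray):
--     hashTable = {}
--     for elem in myarray.lower():
--         if elem in hashTable:
--             hashTable[elem] += 1
--         else:
--             hashTable[elem] = 1
--
--     for elem in myarray.lower():
--         if hashTable[elem] == 1:
--             return elem
-- ===== SOURCE B (Python) =====
-- def getelemwhichhassingleoccurence(myarray):
--     table = {}
--     for i, c in enumerate(myarray.lower()):
--         if c in table:
--             table[c][0] += 1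
--         else:
--             table[c] = [1, i]
--     best = None
--     for c, (cnt, idx) in table.items():
--         if cnt == 1 and (best is None or idx < best[1]):
--             best = (c, idx)
--     return best[0] if best else None
-- ===== Notes on version B (the rewrite author's own statement) =====
-- stated objective: alternative
-- what changed: B builds, in one pass over enumerate(lowered), a dict mapping each char to [count, first_index], then selects the answer by a minimum-search over the dict's items (smallest first_index among count==1 entries) instead of A's second order-preserving scan of the string.
import Mathlib
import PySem

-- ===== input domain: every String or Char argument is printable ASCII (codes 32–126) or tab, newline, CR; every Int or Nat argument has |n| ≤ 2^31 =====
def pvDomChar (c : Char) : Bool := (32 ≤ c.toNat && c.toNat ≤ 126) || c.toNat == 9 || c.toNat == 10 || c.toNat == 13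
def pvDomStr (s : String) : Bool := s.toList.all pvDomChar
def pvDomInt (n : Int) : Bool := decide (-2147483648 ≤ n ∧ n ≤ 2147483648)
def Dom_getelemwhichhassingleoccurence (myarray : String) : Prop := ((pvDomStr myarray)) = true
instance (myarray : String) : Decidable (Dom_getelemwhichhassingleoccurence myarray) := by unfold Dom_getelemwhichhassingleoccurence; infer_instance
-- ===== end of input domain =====

-- B replaces A's second order-preserving scan of the string by a minimum-search over a
-- char → (count, first_index) table built in one pass over enumerate; same O(n) cost, different algorithm.

-- ===== PORT A =====
-- second loop of A: 'for elem in myarray.lower(): if hashTable[elem] == 1: return elem' (falls off → None)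
def pvFindSingleA (ht : PySem.Dict Char Int) : List Char → Option String
  | [] => none
  | c :: rest => if ht.getD c 0 == 1 then some (String.ofList [c]) else pvFindSingleA ht rest

def getelemwhichhassingleoccurence (myarray : String) : Option String :=
  let lowered := (PySem.Str.lower myarray).toList
  let hashTable := lowered.foldl
    (fun d elem => if d.contains elem then d.modify elem 0 (· + 1) else d.insert elem 1)
    (PySem.Dict.empty)
  pvFindSingleA hashTable lowered

-- ===== PORT B =====
def getelemwhichhassingleoccurence_alt (myarray : String) : Option String :=
  let chars := (PySem.Str.lower myarray).toList
  -- 'for i, c in enumerate(...): table[c][0] += 1  /  table[c] = [1, i]'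
  let table := (PySem.List.enumerate chars 0).foldl
    (fun d p => if d.contains p.2 then d.modify p.2 ((0 : Int), (0 : Int)) (fun q => (q.1 + 1, q.2))
                else d.insert p.2 (1, p.1))
    (PySem.Dict.empty)
  -- 'for c, (cnt, idx) in table.items(): if cnt == 1 and (best is None or idx < best[1]): best = (c, idx)'
  let best := table.items.foldl
    (fun (best : Option (Char × Int)) it =>
      if it.2.1 == 1 && (best.isNone || decide (it.2.2 < (best.map Prod.snd).getD 0))
      then some (it.1, it.2.2) else best)
    none
  best.map (fun b => String.ofList [b.1])

-- ===== PRECONDITION & SPEC =====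
def Spec_getelemwhichhassingleoccurence (myarray : String) (out : Option String) : Prop := out = getelemwhichhassingleoccurence_alt myarray
instance (myarray : String) (out : Option String) : Decidable (Spec_getelemwhichhassingleoccurence myarray out) := by unfold Spec_getelemwhichhassingleoccurence; infer_instance

-- ===== CLAIM (what is proved, stated in full; the proofs are below) =====
def Claim_equal_getelemwhichhassingleoccurence : Prop := ∀ (myarray : String), Dom_getelemwhichhassingleoccurence myarray → Spec_getelemwhichhassingleoccurence myarray (getelemwhichhassingleoccurence myarray)

-- ===== LEMMAS AND PROOFS =====

-- A's counting loop computes exactly the occurrence count of every character.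
theorem pvA_count (l : List Char) (d : PySem.Dict Char Int) (v : Char) :
    (l.foldl (fun d elem => if d.contains elem then d.modify elem 0 (· + 1) else d.insert elem 1) d).getD v 0
      = d.getD v 0 + (l.count v : Int) := by
  induction l generalizing d with
  | nil => simp
  | cons c rest ih =>
    simp only [List.foldl_cons, List.count_cons, beq_iff_eq]
    by_cases hc : d.contains c
    · rw [if_pos hc, ih, PySem.Dict.getD_modify]
      by_cases hv : v = c
      · subst hv; rw [if_pos rfl, if_pos rfl]; push_cast; ring
      · rw [if_neg hv, if_neg (fun h => hv h.symm)]; push_cast; ring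
    · rw [if_neg hc, ih, PySem.Dict.getD_insert]
      by_cases hv : v = c
      · subst hv
        rw [if_pos rfl, if_pos rfl,
          PySem.Dict.getD_of_not_contains d 0 (Bool.of_not_eq_true hc)]
        push_cast; ring
      · rw [if_neg hv, if_neg (fun h => hv h.symm)]; push_cast; ring

-- A's return scan is find? mapped to a one-character string.
theorem pvFindSingleA_eq (ht : PySem.Dict Char Int) (l : List Char) :
    pvFindSingleA ht l = (l.find? (fun c => ht.getD c 0 == 1)).map (fun c => String.ofList [c]) := by
  induction l with
  | nil => rfl
  | cons c rest ih =>
    by_cases h : ht.getD c 0 == 1 <;> simp [pvFindSingleA, List.find?, h, ih]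

-- abbreviation for B's table-building step (proof-side name; B's port spells it out)
def pvBStep (d : PySem.Dict Char (Int × Int)) (p : Int × Char) : PySem.Dict Char (Int × Int) :=
  if d.contains p.2 then d.modify p.2 ((0 : Int), (0 : Int)) (fun q => (q.1 + 1, q.2))
  else d.insert p.2 (1, p.1)

def pvBTable (l : List Char) : PySem.Dict Char (Int × Int) :=
  (PySem.List.enumerate l 0).foldl pvBStep PySem.Dict.empty

theorem pvBTable_append (l : List Char) (c : Char) :
    pvBTable (l ++ [c]) = pvBStep (pvBTable l) ((l.length : Int), c) := by
  unfold pvBTable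
  rw [PySem.List.enumerate_append]
  simp [PySem.List.enumerate_cons, PySem.List.enumerate_nil]

theorem pvBTable_keys (l : List Char) : (pvBTable l).keys = PySem.Set.ofList l := by
  induction l using List.reverseRecOn with
  | nil => rfl
  | append_singleton l c ih =>
    rw [pvBTable_append, PySem.Set.ofList_append_singleton, pvBStep]
    by_cases hc : (pvBTable l).contains c
    · have hmem : c ∈ PySem.Set.ofList l := by
        have := (PySem.Dict.contains_iff_mem_keys _ _).mp hc
        rwa [ih] at this
      rw [if_pos hc, PySem.Dict.keys_modify, PySem.Dict.keys_insert_of_contains _ _ hc, ih,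
        PySem.Set.add_of_mem hmem]
    · rw [if_neg hc, PySem.Dict.keys_insert_of_not_contains _ _ (Bool.of_not_eq_true hc), ih,
        PySem.Set.add_of_not_mem (by
          intro hm
          exact hc ((PySem.Dict.contains_iff_mem_keys _ _).mpr (by rw [ih]; exact hm)))]

theorem pvBTable_contains (l : List Char) (c : Char) :
    (pvBTable l).contains c = decide (c ∈ l) := by
  rw [PySem.Dict.contains_eq_decide_mem_keys, pvBTable_keys]
  simp [PySem.Set.mem_ofList]

-- the table maps each char of l to (its count in l, its first index in l)
theorem pvBTable_getD (l : List Char) (v : Char) :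
    (pvBTable l).getD v (0, 0)
      = if v ∈ l then ((l.count v : Int), (l.idxOf v : Int)) else (0, 0) := by
  induction l using List.reverseRecOn with
  | nil => simp [pvBTable, PySem.List.enumerate_nil]
  | append_singleton l c ih =>
    rw [pvBTable_append, pvBStep, pvBTable_contains]
    by_cases hc : c ∈ l
    · rw [if_pos (by simpa using hc), PySem.Dict.getD_modify]
      by_cases hv : v = c
      · subst hv
        rw [if_pos rfl, ih, if_pos hc, if_pos (List.mem_append_left _ hc),
          List.idxOf_append_of_mem hc]
        simp [List.count_append]
      · rw [if_neg hv, ih]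
        by_cases hvl : v ∈ l
        · rw [if_pos hvl, if_pos (List.mem_append_left _ hvl), List.idxOf_append_of_mem hvl]
          simp [List.count_append, List.count_eq_zero, hv]
        · rw [if_neg hvl, if_neg (by simp [hvl, hv])]
    · rw [if_neg (by simpa using hc), PySem.Dict.getD_insert]
      by_cases hv : v = c
      · subst hv
        rw [if_pos rfl, if_pos (List.mem_append_right _ (List.mem_singleton_self v))]
        have h1 : (l ++ [v]).count v = 1 := by simp [List.count_append, List.count_eq_zero.mpr hc]
        have h2 : (l ++ [v]).idxOf v = l.length := by simp [List.idxOf_append, hc]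
        simp [h1, h2]
      · rw [if_neg hv, ih]
        by_cases hvl : v ∈ l
        · rw [if_pos hvl, if_pos (List.mem_append_left _ hvl), List.idxOf_append_of_mem hvl]
          simp [List.count_append, List.count_eq_zero, hv]
        · rw [if_neg hvl, if_neg (by simp [hvl, hv])]

-- first-occurrence indices are strictly increasing along the dict's key order
theorem pvOfList_pairwise_idx (l : List Char) :
    (PySem.Set.ofList l).Pairwise (fun a b => l.idxOf a < l.idxOf b) := by
  induction l using List.reverseRecOn with
  | nil => exact List.Pairwise.nil
  | append_singleton l c ih =>
    rw [PySem.Set.ofList_append_singleton]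
    by_cases hc : c ∈ l
    · rw [PySem.Set.add_of_mem (by simp [PySem.Set.mem_ofList, hc])]
      refine List.Pairwise.imp_of_mem (fun {a b} ha hb r => ?_) ih
      have ha' : a ∈ l := (PySem.Set.mem_ofList _ _).mp ha
      have hb' : b ∈ l := (PySem.Set.mem_ofList _ _).mp hb
      rwa [List.idxOf_append_of_mem ha', List.idxOf_append_of_mem hb']
    · rw [PySem.Set.add_of_not_mem (by simp [PySem.Set.mem_ofList, hc])]
      rw [List.pairwise_append]
      refine ⟨List.Pairwise.imp_of_mem (fun {a b} ha hb r => ?_) ih, List.pairwise_singleton _ _,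
        fun a ha b hb => ?_⟩
      · have ha' : a ∈ l := (PySem.Set.mem_ofList _ _).mp ha
        have hb' : b ∈ l := (PySem.Set.mem_ofList _ _).mp hb
        rwa [List.idxOf_append_of_mem ha', List.idxOf_append_of_mem hb']
      · have ha' : a ∈ l := (PySem.Set.mem_ofList _ _).mp ha
        have hb' : b = c := List.mem_singleton.mp hb
        subst hb'
        rw [List.idxOf_append_of_mem ha']
        have h2 : (l ++ [b]).idxOf b = l.length := by simp [List.idxOf_append, hc]
        rw [h2]
        exact List.idxOf_lt_length_of_mem ha'

-- the items list of B's table, written as a map over the first-occurrence dedup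
theorem pvBTable_items (l : List Char) :
    (pvBTable l).items
      = (PySem.Set.ofList l).map (fun v => (v, ((l.count v : Int), (l.idxOf v : Int)))) := by
  rw [PySem.Dict.items_eq_map_keys (pvBTable l)
      (by rw [pvBTable_keys]; exact PySem.Set.nodup_ofList l) ((0 : Int), (0 : Int))]
  rw [pvBTable_keys]
  refine List.map_congr_left (fun v hv => ?_)
  rw [pvBTable_getD]
  simp [(PySem.Set.mem_ofList _ _).mp hv]

-- B's minimum-scan step (proof-side name; B's port spells it out)
def pvScanStep (best : Option (Char × Int)) (it : Char × (Int × Int)) : Option (Char × Int) :=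
  if it.2.1 == 1 && (best.isNone || decide (it.2.2 < (best.map Prod.snd).getD 0))
  then some (it.1, it.2.2) else best

-- once best holds the smallest index seen, later (larger-index) items never replace it
theorem pvScan_stay (its : List (Char × (Int × Int))) (c0 : Char) (i0 : Int)
    (h : ∀ it ∈ its, i0 < it.2.2) :
    its.foldl pvScanStep (some (c0, i0)) = some (c0, i0) := by
  induction its with
  | nil => rfl
  | cons it rest ih =>
    have hlt : ¬ it.2.2 < i0 := not_lt_of_gt (h it (List.mem_cons_self))
    simp only [List.foldl_cons, pvScanStep, Option.map_some, Option.getD_some, Option.isNone_some, Bool.false_or]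
    rw [if_neg (by simp [hlt])]
    exact ih (fun x hx => h x (List.mem_cons_of_mem _ hx))

-- on a list with strictly increasing stored indices, the minimum-scan is the first count-1 item
theorem pvScan_eq_find (its : List (Char × (Int × Int)))
    (h : its.Pairwise (fun a b => a.2.2 < b.2.2)) :
    its.foldl pvScanStep none
      = (its.find? (fun it => it.2.1 == 1)).map (fun it => (it.1, it.2.2)) := by
  induction its with
  | nil => rfl
  | cons it rest ih =>
    rw [List.pairwise_cons] at h
    by_cases h1 : it.2.1 == 1
    · simp only [List.foldl_cons, pvScanStep, Option.isNone_none, Bool.true_or, h1,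
        Bool.true_and, if_pos]
      rw [pvScan_stay rest it.1 it.2.2 h.1,
        List.find?_cons_of_pos (p := fun x : Char × Int × Int => x.2.1 == 1) h1]
      rfl
    · simp only [List.foldl_cons, pvScanStep, h1, Bool.false_and, Bool.false_eq_true, if_false]
      rw [List.find?_cons_of_neg (p := fun x : Char × Int × Int => x.2.1 == 1) (by simpa using h1)]
      exact ih h.2

-- find? over the first-occurrence dedup equals find? over the list itself (any predicate)
theorem pvFoldlAdd_find? (p : Char → Bool) (l : List Char) (s : List Char) :
    (l.foldl PySem.Set.add s).find? p
      = (s.find? p).or (l.find? (fun c => p c && !(s.contains c))) := by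
  induction l generalizing s with
  | nil => simp
  | cons c t ih =>
    simp only [List.foldl_cons]
    rw [ih]
    by_cases hc : c ∈ s
    · rw [PySem.Set.add_of_mem hc]
      have : (List.find? (fun x => p x && !s.contains x) (c :: t))
          = t.find? (fun x => p x && !s.contains x) := by
        rw [List.find?_cons_of_neg]
        simp [hc]
      rw [this]
    · rw [PySem.Set.add_of_not_mem hc, List.find?_append]
      by_cases hp : p c
      · have h1 : List.find? p [c] = some c := by simp [hp]
        have h2 : (List.find? (fun x => p x && !s.contains x) (c :: t)) = some c := by
          rw [List.find?_cons_of_pos]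
          simp [hp, hc]
        rw [h1, h2, Option.or_assoc]
        simp
      · have h1 : List.find? p [c] = none := by simp [hp]
        have hpe : (fun x => p x && !((s ++ [c]).contains x))
            = (fun x => p x && !s.contains x) := by
          funext x
          by_cases hxc : x = c
          · subst hxc; simp [hp]
          · simp [hxc]
        have h2 : (List.find? (fun x => p x && !((s ++ [c]).contains x)) t)
            = t.find? (fun x => p x && !s.contains x) := by rw [hpe]
        have h3 : (List.find? (fun x => p x && !s.contains x) (c :: t))
            = t.find? (fun x => p x && !s.contains x) := by
          rw [List.find?_cons_of_neg]
          simp [hp]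
        rw [h1, h2, h3, Option.or_none]

theorem pvOfList_find? (p : Char → Bool) (l : List Char) :
    (PySem.Set.ofList l).find? p = l.find? p := by
  rw [PySem.Set.ofList_eq_foldl, pvFoldlAdd_find? p l []]
  simp

-- ===== VERDICT (by name: the statement is the Claim_ definition above) =====
theorem getelemwhichhassingleoccurence_spec : Claim_equal_getelemwhichhassingleoccurence := by
  intro myarray _
  show getelemwhichhassingleoccurence myarray = getelemwhichhassingleoccurence_alt myarray
  unfold getelemwhichhassingleoccurence getelemwhichhassingleoccurence_alt
  simp only []
  set l := (PySem.Str.lower myarray).toList with hl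
  -- A side: find? over the string with the count predicate
  rw [pvFindSingleA_eq]
  have hA : (l.find? (fun c =>
        (l.foldl (fun d elem => if d.contains elem then d.modify elem 0 (· + 1) else d.insert elem 1)
          (PySem.Dict.empty : PySem.Dict Char Int)).getD c 0 == 1))
      = l.find? (fun c => (l.count c : Int) == 1) := by
    have hpe : (fun c =>
        (l.foldl (fun d elem => if d.contains elem then d.modify elem 0 (· + 1) else d.insert elem 1)
          (PySem.Dict.empty : PySem.Dict Char Int)).getD c 0 == 1)
        = (fun c => ((l.count c : Int) == 1)) := by
      funext c
      rw [pvA_count l PySem.Dict.empty c, PySem.Dict.getD_empty, zero_add]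
    rw [hpe]
  rw [hA]
  -- B side: rewrite the table fold and the scan fold into the proof-side names
  have hstep : (fun (d : PySem.Dict Char (Int × Int)) (p : Int × Char) =>
      if d.contains p.2 then d.modify p.2 ((0 : Int), (0 : Int)) (fun q => (q.1 + 1, q.2))
      else d.insert p.2 (1, p.1)) = pvBStep := rfl
  have hscan : (fun (best : Option (Char × Int)) (it : Char × (Int × Int)) =>
      if it.2.1 == 1 && (best.isNone || decide (it.2.2 < (best.map Prod.snd).getD 0))
      then some (it.1, it.2.2) else best) = pvScanStep := rfl
  rw [hstep, hscan]
  have htab : (PySem.List.enumerate l 0).foldl pvBStep PySem.Dict.empty = pvBTable l := rfl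
  rw [htab, pvBTable_items l]
  have hpair : ((PySem.Set.ofList l).map
      (fun v => (v, ((l.count v : Int), (l.idxOf v : Int))))).Pairwise
      (fun a b => a.2.2 < b.2.2) :=
    List.Pairwise.map _ (fun a b h => by
      show (l.idxOf a : Int) < (l.idxOf b : Int)
      exact_mod_cast h) (pvOfList_pairwise_idx l)
  rw [pvScan_eq_find _ hpair]
  rw [List.find?_map]
  have hpred : ((fun (it : Char × (Int × Int)) => it.2.1 == 1) ∘
      (fun v => (v, ((l.count v : Int), (l.idxOf v : Int)))))
      = fun c => ((l.count c : Int) == 1) := rfl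
  rw [hpred, pvOfList_find?]
  cases l.find? (fun c => (l.count c : Int) == 1) <;> rfl
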